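-- pv_equiv track=rewrite | github.com/zaryshnyak/cs102 | homework02/Sudoku.py | get_block
-- ===== SOURCE A (Python) =====
-- def get_block(values, pos):
--     # Возвращает все значения из квадрата, в который попадает позиция pos
--     # >>> grid = read_sudoku('puzzle1.txt')
--     # >>> get_block(grid, (0, 1))
--     # ['5', '3', '.', '6', '.', '.', '.', '9', '8']
--     # >>> get_block(grid, (4, 7))
--     # ['.', '.', '3', '.', '.', '1', '.', '.', '6']
--     # >>> get_block(grid, (8, 8))
--     # ['2', '8', '.', '.', '.', '5', '.', '7', '9']
--     row, col = pos
--     i = 0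
--     j = 0
--     list = []
--     borderRow1 = 0
--     borderRow2 = 0
--     borderCol1 = 0
--     borderCol2 = 0
--     if (row <= 2) and (row >= 0):
--         borderRow1 = 0
--         borderRow2 = 2
--     elif (row <= 5) and (row >= 3):
--         borderRow1 = 3
--         borderRow2 = 5
--     else:
--         borderRow1 = 6
--         borderRow2 = 8
--     if (col <= 2) and (col >= 0):
--         borderCol1 = 0
--         borderCol2 = 2
--     elif (col <= 5) and (col >= 3):
--         borderCol1 = 3
--         borderCol2 = 5
--     else:
--         borderCol1 = 6
--         borderCol2 = 8
--     while i <= 8: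
--         while j <= 8:
--             if ((i >= borderRow1) and (i <= borderRow2) and (
--                     j >= borderCol1) and (j <= borderCol2)):
--                 list.append(values[i][j])
--             j += 1
--         j = 0
--         i += 1
--     return list
-- ===== SOURCE B (Python) =====
-- def get_block(values, pos):
--     row, col = pos
--     if 0 <= row <= 2:
--         r0 = 0
--     elif 3 <= row <= 5:
--         r0 = 3
--     else:
--         r0 = 6
--     if 0 <= col <= 2:
--         c0 = 0
--     elif 3 <= col <= 5:
--         c0 = 3
--     else:
--         c0 = 6
--     return [values[i][j] for i in range(r0, r0 + 3) for j in range(c0, c0 + 3)]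
-- ===== Notes on version B (the rewrite author's own statement) =====
-- stated objective: simpler
-- what changed: B computes the 3x3 block bounds with the same if/elif logic but visits only the 9 block cells directly via a comprehension over range(r0,r0+3) x range(c0,c0+3), instead of A's 81-cell scan over the whole grid with an in-bounds filter.
import Mathlib
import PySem

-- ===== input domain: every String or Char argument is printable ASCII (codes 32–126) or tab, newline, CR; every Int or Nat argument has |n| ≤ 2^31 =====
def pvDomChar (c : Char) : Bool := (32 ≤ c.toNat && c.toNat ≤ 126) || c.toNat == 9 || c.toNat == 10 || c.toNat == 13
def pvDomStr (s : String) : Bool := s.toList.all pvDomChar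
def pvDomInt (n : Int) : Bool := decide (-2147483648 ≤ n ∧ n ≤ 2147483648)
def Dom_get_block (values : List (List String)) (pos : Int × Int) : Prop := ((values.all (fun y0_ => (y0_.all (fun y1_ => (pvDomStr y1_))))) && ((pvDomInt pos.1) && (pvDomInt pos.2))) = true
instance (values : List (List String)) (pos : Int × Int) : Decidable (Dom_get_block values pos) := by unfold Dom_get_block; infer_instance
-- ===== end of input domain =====

-- B replaces A's 81-cell scan-and-filter with a direct 9-cell traversal of the block (same bounds logic); objective: simpler.


-- ===== PORT A =====
-- A scans all i,j in 0..8 and appends values[i][j] whenever (i,j) is inside the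
-- block borders computed by the if/elif chains (out-of-range rows/cols fall into the
-- 6..8 block, as in the Python). Indices are nonnegative; the `getD` defaults are
-- never reached inside Pre_get_block (Python would raise IndexError there).
def get_block (values : List (List String)) (pos : Int × Int) : List String :=
  let row := pos.1
  let col := pos.2
  let bR : Int × Int :=
    if row ≤ 2 ∧ 0 ≤ row then (0, 2)
    else if row ≤ 5 ∧ 3 ≤ row then (3, 5)
    else (6, 8)
  let bC : Int × Int :=
    if col ≤ 2 ∧ 0 ≤ col then (0, 2)
    else if col ≤ 5 ∧ 3 ≤ col then (3, 5)
    else (6, 8)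
  (List.range 9).foldl (fun acc (i : Nat) =>
    (List.range 9).foldl (fun acc2 (j : Nat) =>
      if bR.1 ≤ (i : Int) ∧ (i : Int) ≤ bR.2 ∧ bC.1 ≤ (j : Int) ∧ (j : Int) ≤ bC.2 then
        acc2 ++ [(values.getD i []).getD j ""]
      else acc2) acc) []

-- ===== PORT B =====
def get_block_alt (values : List (List String)) (pos : Int × Int) : List String :=
  let r0 : Nat :=
    if 0 ≤ pos.1 ∧ pos.1 ≤ 2 then 0
    else if 3 ≤ pos.1 ∧ pos.1 ≤ 5 then 3
    else 6
  let c0 : Nat :=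
    if 0 ≤ pos.2 ∧ pos.2 ≤ 2 then 0
    else if 3 ≤ pos.2 ∧ pos.2 ≤ 5 then 3
    else 6
  (List.range 3).flatMap (fun di =>
    (List.range 3).map (fun dj => (values.getD (r0 + di) []).getD (c0 + dj) ""))

-- ===== PRECONDITION & SPEC =====
-- Pre_ excludes exactly the inputs on which the Python A raises IndexError:
-- the grid must contain the three block rows, each long enough for the three block columns.
def Pre_get_block (values : List (List String)) (pos : Int × Int) : Prop :=
  let r0 : Nat := if 0 ≤ pos.1 ∧ pos.1 ≤ 2 then 0 else if 3 ≤ pos.1 ∧ pos.1 ≤ 5 then 3 else 6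
  let c0 : Nat := if 0 ≤ pos.2 ∧ pos.2 ≤ 2 then 0 else if 3 ≤ pos.2 ∧ pos.2 ≤ 5 then 3 else 6
  r0 + 3 ≤ values.length ∧ ∀ r ∈ (values.drop r0).take 3, c0 + 3 ≤ r.length
instance (values : List (List String)) (pos : Int × Int) : Decidable (Pre_get_block values pos) := by unfold Pre_get_block; infer_instance

def pvWitness_get_block : List (List String) × (Int × Int) :=
  ([["1","2","3"],["4","5","6"],["7","8","9"]], (0, 1))

def Spec_get_block (values : List (List String)) (pos : Int × Int) (out : List String) : Prop := out = get_block_alt values pos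
instance (values : List (List String)) (pos : Int × Int) (out : List String) : Decidable (Spec_get_block values pos out) := by unfold Spec_get_block; infer_instance

-- ===== CLAIM (what is proved, stated in full; the proofs are below) =====
def Claim_equal_get_block : Prop := ∀ (values : List (List String)) (pos : Int × Int), Dom_get_block values pos → Pre_get_block values pos → Spec_get_block values pos (get_block values pos)

-- ===== LEMMAS AND PROOFS =====

-- With fixed block bounds, both sides reduce to the same explicit 9-cell list.
theorem get_block_eq_alt (values : List (List String)) (pos : Int × Int) :
    get_block values pos = get_block_alt values pos := by
  obtain ⟨row, col⟩ := pos
  unfold get_block get_block_alt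
  by_cases h1 : row ≤ 2 ∧ 0 ≤ row <;> by_cases h2 : row ≤ 5 ∧ 3 ≤ row <;>
    by_cases h3 : col ≤ 2 ∧ 0 ≤ col <;> by_cases h4 : col ≤ 5 ∧ 3 ≤ col <;>
    simp only [h1, h2, h3, h4, if_neg, not_false_iff] <;>
    first
    | (exfalso; omega)
    | (have e1 : (0 ≤ row ∧ row ≤ 2) = (row ≤ 2 ∧ 0 ≤ row) := by rw [eq_iff_iff]; constructor <;> (intro h; omega)
       have e2 : (3 ≤ row ∧ row ≤ 5) = (row ≤ 5 ∧ 3 ≤ row) := by rw [eq_iff_iff]; constructor <;> (intro h; omega)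
       have e3 : (0 ≤ col ∧ col ≤ 2) = (col ≤ 2 ∧ 0 ≤ col) := by rw [eq_iff_iff]; constructor <;> (intro h; omega)
       have e4 : (3 ≤ col ∧ col ≤ 5) = (col ≤ 5 ∧ 3 ≤ col) := by rw [eq_iff_iff]; constructor <;> (intro h; omega)
       simp only [e1, e2, e3, e4, h1, h2, h3, h4]
       simp [List.range_succ])

-- ===== VERDICT (by name: the statement is the Claim_ definition above) =====
theorem get_block_spec : Claim_equal_get_block := by
  intro values pos _ _
  show get_block values pos = get_block_alt values pos
  exact get_block_eq_alt values pos
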